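-- pv_equiv track=rewrite | github.com/arjunsabu300/Flamigo | Flamigo/src/Backend/Analyzer/Analyzer.py | is_plant
-- ===== SOURCE A (Python) =====
-- def is_plant(preds):
--     plant_keywords = [
--         'plant', 'tree', 'flower', 'cactus', 'sunflower', 'palm', 'corn',
--         'maize', 'mushroom', 'daisy', 'tulip', 'rose', 'pine', 'oak',
--         'fern', 'herb', 'shrub', 'weed'
--     ]
--     for _, label, prob in preds[0]:
--         if any(keyword in label.lower() for keyword in plant_keywords):
--             return True
--     return False
-- ===== SOURCE B (Python) =====
-- def is_plant(preds):
--     plant_keywords = [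
--         'plant', 'tree', 'flower', 'cactus', 'sunflower', 'palm', 'corn',
--         'maize', 'mushroom', 'daisy', 'tulip', 'rose', 'pine', 'oak',
--         'fern', 'herb', 'shrub', 'weed'
--     ]
--     # One blob: lower every label once, join with a separator no keyword contains,
--     # then run each keyword over the single blob instead of per-label scans.
--     blob = '!'.join(label.lower() for _, label, _ in preds[0])
--     return any(kw in blob for kw in plant_keywords)
-- ===== Notes on version B (the rewrite author's own statement) =====
-- stated objective: alternative
-- what changed: Instead of testing all 18 keywords against each label inside the loop, B lowers every label of preds[0] once, joins them into a single blob with a separator ('!') that no keyword can span, and runs each keyword once over that blob.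
import Mathlib
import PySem

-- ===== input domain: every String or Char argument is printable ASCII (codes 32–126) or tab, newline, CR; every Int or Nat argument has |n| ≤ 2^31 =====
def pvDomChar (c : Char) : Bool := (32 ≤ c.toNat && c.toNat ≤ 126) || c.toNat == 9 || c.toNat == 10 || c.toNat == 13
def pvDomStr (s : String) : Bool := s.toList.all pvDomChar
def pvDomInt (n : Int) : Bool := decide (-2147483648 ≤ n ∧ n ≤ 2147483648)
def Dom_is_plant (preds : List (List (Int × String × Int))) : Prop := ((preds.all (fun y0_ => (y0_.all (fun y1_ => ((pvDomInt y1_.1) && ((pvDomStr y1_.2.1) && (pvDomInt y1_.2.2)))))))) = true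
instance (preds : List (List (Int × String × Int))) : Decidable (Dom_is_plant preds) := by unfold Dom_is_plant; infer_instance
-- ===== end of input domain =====

-- B lowers every label once, joins them with a separator ('!') that no keyword contains,
-- and scans each keyword over that single blob, instead of A's per-label any-keyword scan
-- (alternative decomposition; same observable result, no speed claim).

-- the keyword list shared by both sources
def pvKeywords : List String :=
  ["plant", "tree", "flower", "cactus", "sunflower", "palm", "corn",
   "maize", "mushroom", "daisy", "tulip", "rose", "pine", "oak",
   "fern", "herb", "shrub", "weed"]

-- ===== PORT A =====
-- 'for _, label, prob in preds[0]: if any(kw in label.lower() ...): return True' / 'return False'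
def pvLoopA : List (Int × String × Int) → Bool
  | [] => false
  | (_, label, _) :: rest =>
    if pvKeywords.any (fun kw => PySem.Str.isIn kw (PySem.Str.lower label)) then true
    else pvLoopA rest

def is_plant (preds : List (List (Int × String × Int))) : Bool :=
  match PySem.List.pyGet? preds 0 with   -- preds[0]; none = IndexError, excluded by Pre_
  | some row => pvLoopA row
  | none => false

-- ===== PORT B =====
def is_plant_alt (preds : List (List (Int × String × Int))) : Bool :=
  let blob := PySem.Str.join "!"
    (((PySem.List.pyGet? preds 0).getD []).map (fun t => PySem.Str.lower t.2.1))
  pvKeywords.any (fun kw => PySem.Str.isIn kw blob)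

-- ===== PRECONDITION & SPEC =====
-- A (and B) evaluate preds[0]: the empty list raises IndexError, so it is excluded.
def Pre_is_plant (preds : List (List (Int × String × Int))) : Prop := preds ≠ []
instance (preds : List (List (Int × String × Int))) : Decidable (Pre_is_plant preds) := by
  unfold Pre_is_plant; infer_instance

def pvWitness_is_plant : (List (List (Int × String × Int))) := [[(1, "rose!", 3)]]

def Spec_is_plant (preds : List (List (Int × String × Int))) (out : Bool) : Prop := out = is_plant_alt preds
instance (preds : List (List (Int × String × Int))) (out : Bool) : Decidable (Spec_is_plant preds out) := by unfold Spec_is_plant; infer_instance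

-- ===== CLAIM (what is proved, stated in full; the proofs are below) =====
def Claim_equal_is_plant : Prop := ∀ (preds : List (List (Int × String × Int))), Dom_is_plant preds → Pre_is_plant preds → Spec_is_plant preds (is_plant preds)

-- ===== LEMMAS AND PROOFS =====

-- a prefix of y ++ c :: rest that avoids c is a prefix of y
theorem pv_prefix_avoid {c : Char} : ∀ (sub y rest : List Char), c ∉ sub →
    sub <+: y ++ c :: rest → sub <+: y
  | [], _, _, _, _ => List.nil_prefix
  | d :: ds, [], rest, hc, h => by
    rw [List.nil_append, List.cons_prefix_cons] at h
    exact absurd (h.1 ▸ List.mem_cons_self) hc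
  | d :: ds, e :: y', rest, hc, h => by
    rw [List.cons_append, List.cons_prefix_cons] at h
    exact List.cons_prefix_cons.mpr
      ⟨h.1, pv_prefix_avoid ds y' rest (fun hm => hc (List.mem_cons_of_mem _ hm)) h.2⟩

-- an infix avoiding the separator lies entirely on one side of it
theorem pv_infix_sep_iff {c : Char} {sub : List Char} (hc : c ∉ sub)
    (a b : List Char) : sub <:+: a ++ c :: b ↔ sub <:+: a ∨ sub <:+: b := by
  constructor
  · intro h
    obtain ⟨j, hj⟩ := (PySem.Chars.exists_prefix_drop_iff_isIn sub (a ++ c :: b)).mpr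
      ((PySem.Chars.isIn_iff_infix sub _).mpr h)
    by_cases hle : j ≤ a.length
    · rw [List.drop_append_of_le_length hle] at hj
      left
      exact ((PySem.Chars.isIn_iff_infix sub a).mp
        ((PySem.Chars.exists_prefix_drop_iff_isIn sub a).mp
          ⟨j, pv_prefix_avoid sub (a.drop j) b hc hj⟩))
    · right
      obtain ⟨m, hm⟩ : ∃ m, j - a.length = m + 1 := ⟨j - a.length - 1, by omega⟩
      have hdrop : List.drop j (a ++ c :: b) = List.drop m b := by
        rw [List.drop_append, List.drop_eq_nil_of_le (by omega), hm,
          List.drop_succ_cons, List.nil_append]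
      rw [hdrop] at hj
      exact ((PySem.Chars.isIn_iff_infix sub b).mp
        ((PySem.Chars.exists_prefix_drop_iff_isIn sub b).mp ⟨m, hj⟩))
  · rintro (⟨s, t, rfl⟩ | ⟨s, t, rfl⟩)
    · exact ⟨s, t ++ c :: b, by simp⟩
    · exact ⟨a ++ c :: s, t, by simp⟩

-- scanning a keyword over the '!'-joined blob = scanning it over each piece
theorem pv_isIn_join {sub : List Char} (hne : sub ≠ []) (hc : ('!' : Char) ∉ sub) :
    ∀ (l : List (List Char)),
      PySem.Chars.isIn sub (PySem.Chars.join ['!'] l) = l.any (fun x => PySem.Chars.isIn sub x)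
  | [] => by
    rw [PySem.Chars.join_nil, List.any_nil]
    exact (PySem.Chars.isIn_eq_false_iff sub []).mpr (fun h => hne (List.infix_nil.mp h))
  | [x] => by rw [PySem.Chars.join_singleton]; simp
  | x :: y :: r => by
    rw [PySem.Chars.join_cons_cons]
    apply Bool.eq_iff_iff.mpr
    rw [List.any_cons, Bool.or_eq_true,
      ← pv_isIn_join hne hc (y :: r)]
    simp only [PySem.Chars.isIn_iff_infix, List.append_assoc, List.singleton_append]
    exact pv_infix_sep_iff hc x _

-- A's loop is an 'any' over the row
theorem pv_loopA_eq_any : ∀ (row : List (Int × String × Int)),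
    pvLoopA row = row.any (fun t => pvKeywords.any (fun kw => PySem.Str.isIn kw (PySem.Str.lower t.2.1)))
  | [] => rfl
  | (i, label, p) :: rest => by
    have hred : ((i, label, p) : Int × String × Int).2.1 = label := rfl
    rw [pvLoopA, List.any_cons, pv_loopA_eq_any rest, hred]
    cases h : pvKeywords.any (fun kw => PySem.Str.isIn kw (PySem.Str.lower label)) <;>
      simp

theorem pv_keywords_ok : ∀ kw ∈ pvKeywords, kw.toList ≠ [] ∧ ('!' : Char) ∉ kw.toList := by
  decide

theorem pv_row_eq (row : List (Int × String × Int)) :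
    pvLoopA row = pvKeywords.any (fun kw =>
      PySem.Str.isIn kw (PySem.Str.join "!" (row.map (fun t => PySem.Str.lower t.2.1)))) := by
  rw [pv_loopA_eq_any]
  have hsep : ("!" : String).toList = ['!'] := rfl
  apply Bool.eq_iff_iff.mpr
  simp only [PySem.Str.isIn_eq, PySem.Str.toList_join, List.map_map, hsep,
    List.any_eq_true]
  constructor
  · rintro ⟨t, ht, kw, hkw, hin⟩
    refine ⟨kw, hkw, ?_⟩
    obtain ⟨hne, hc⟩ := pv_keywords_ok kw hkw
    rw [pv_isIn_join hne hc, List.any_eq_true]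
    exact ⟨(PySem.Str.lower t.2.1).toList, List.mem_map.mpr ⟨t, ht, rfl⟩, hin⟩
  · rintro ⟨kw, hkw, hin⟩
    obtain ⟨hne, hc⟩ := pv_keywords_ok kw hkw
    rw [pv_isIn_join hne hc, List.any_eq_true] at hin
    obtain ⟨x, hx, hinx⟩ := hin
    obtain ⟨t, ht, rfl⟩ := List.mem_map.mp hx
    exact ⟨t, ht, kw, hkw, hinx⟩

-- ===== VERDICT (by name: the statement is the Claim_ definition above) =====
theorem is_plant_spec : Claim_equal_is_plant := by
  intro preds _ hpre
  unfold Spec_is_plant is_plant is_plant_alt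
  cases preds with
  | nil => exact absurd rfl hpre
  | cons row rest =>
    have h0 : PySem.List.pyGet? (row :: rest) (0 : Int) = some row := by
      simp [PySem.List.pyGet?, PySem.List.pyIdx?]
    rw [h0]
    exact pv_row_eq row
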